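-- pv_equiv track=rewrite | github.com/crazybass81/T-Developer | backend/src/agents/ecs-integrated/component_decision/modules/microservice_decomposer.py | _identify_capabilities
-- ===== SOURCE A (Python) =====
-- from typing import Dict, Any, List, Optional, Tuple
--
-- def _identify_capabilities(entities: List[str]) -> List[str]:
--     """Identify business capabilities"""
--
--     capabilities = []
--
--     for entity in entities:
--         if "User" in entity:
--             capabilities.extend(["authentication", "authorization"])
--         if "Product" in entity:
--             capabilities.extend(["catalog_management", "search"])
--         if "Order" in entity:
--             capabilities.extend(["order_processing", "fulfillment"])
--
--     return list(set(capabilities))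
-- ===== SOURCE B (Python) =====
-- from typing import Dict, Any, List, Optional, Tuple
--
-- _CAPS = {
--     "User": ["authentication", "authorization"],
--     "Product": ["catalog_management", "search"],
--     "Order": ["order_processing", "fulfillment"],
-- }
--
-- def _identify_capabilities(entities: List[str]) -> List[str]:
--     """Identify business capabilities"""
--     matched = list(dict.fromkeys(kw for e in entities for kw in _CAPS if kw in e))
--     return [cap for kw in matched for cap in _CAPS[kw]]
-- ===== Notes on version B (the rewrite author's own statement) =====
-- stated objective: simpler
-- what changed: B dedups the matched keywords (dict.fromkeys, deterministic first-occurrence order) and then expands each keyword to its capability list from a single mapping, instead of accumulating capability strings entity by entity and set-deduplicating the whole list at the end.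
import Mathlib
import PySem

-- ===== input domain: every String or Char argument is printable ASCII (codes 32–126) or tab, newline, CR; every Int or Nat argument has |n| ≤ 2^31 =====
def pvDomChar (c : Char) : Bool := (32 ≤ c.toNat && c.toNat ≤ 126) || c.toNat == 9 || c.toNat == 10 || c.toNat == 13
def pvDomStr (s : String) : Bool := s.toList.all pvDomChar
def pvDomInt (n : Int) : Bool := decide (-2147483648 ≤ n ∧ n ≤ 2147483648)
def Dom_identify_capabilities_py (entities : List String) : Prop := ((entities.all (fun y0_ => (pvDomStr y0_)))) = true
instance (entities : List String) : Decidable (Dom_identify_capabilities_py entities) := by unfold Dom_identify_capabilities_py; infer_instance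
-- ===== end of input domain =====

-- B dedups the matched keywords (first-occurrence order) and expands them to their capability
-- lists, instead of accumulating capability strings per entity and set-deduplicating at the end
-- (objective: simpler). Python A's list(set(...)) order is hash-dependent; outputs are compared
-- as sets, and both ports fix the first-occurrence order.

-- ===== PORT A =====
def identify_capabilities_py (entities : List String) : List String :=
  let capabilities := entities.foldl (fun capabilities entity =>
    let capabilities := if PySem.Str.isIn "User" entity then capabilities ++ ["authentication", "authorization"] else capabilities
    let capabilities := if PySem.Str.isIn "Product" entity then capabilities ++ ["catalog_management", "search"] else capabilities
    let capabilities := if PySem.Str.isIn "Order" entity then capabilities ++ ["order_processing", "fulfillment"] else capabilities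
    capabilities) []
  -- list(set(capabilities)): Python's set iteration order is hash-dependent and not modelled;
  -- ported as the first-occurrence order (PySem.Set.ofList) — exact as a set of elements.
  PySem.Set.ofList capabilities

-- ===== PORT B =====
def pvCapsDict : PySem.Dict String (List String) :=
  PySem.Dict.ofList [("User", ["authentication", "authorization"]),
   ("Product", ["catalog_management", "search"]),
   ("Order", ["order_processing", "fulfillment"])]

def identify_capabilities_py_alt (entities : List String) : List String :=
  let matched := PySem.List.dedup (entities.flatMap (fun e =>
    (PySem.Dict.keys pvCapsDict).filter (fun kw => PySem.Str.isIn kw e)))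
  -- _CAPS[kw]: kw is always a key of _CAPS here, so getD with default [] is exact
  matched.flatMap (fun kw => PySem.Dict.getD pvCapsDict kw [])

-- ===== PRECONDITION & SPEC =====
def Spec_identify_capabilities_py (entities : List String) (out : List String) : Prop := out = identify_capabilities_py_alt entities
instance (entities : List String) (out : List String) : Decidable (Spec_identify_capabilities_py entities out) := by unfold Spec_identify_capabilities_py; infer_instance

-- ===== CLAIM (what is proved, stated in full; the proofs are below) =====
def Claim_equal_identify_capabilities_py : Prop := ∀ (entities : List String), Dom_identify_capabilities_py entities → Spec_identify_capabilities_py entities (identify_capabilities_py entities)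

-- ===== LEMMAS AND PROOFS =====

def pvKws : List String := ["User", "Product", "Order"]
def pvPay (kw : String) : List String := PySem.Dict.getD pvCapsDict kw []

theorem pv_keys_caps : PySem.Dict.keys pvCapsDict = pvKws := by decide

theorem pv_payU : pvPay "User" = ["authentication", "authorization"] := by decide
theorem pv_payP : pvPay "Product" = ["catalog_management", "search"] := by decide
theorem pv_payO : pvPay "Order" = ["order_processing", "fulfillment"] := by decide

theorem pv_pay_nodup : ∀ k ∈ pvKws, (pvPay k).Nodup := by decide

theorem pv_pay_disjoint : ∀ k ∈ pvKws, ∀ k' ∈ pvKws, k ≠ k' → ∀ y ∈ pvPay k, y ∉ pvPay k' := by decide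

-- set-union of a concatenation of disjoint payload blocks = payload expansion of the deduped keys
theorem pv_block (ks : List String) : ∀ (acc : List String), (∀ k ∈ ks, k ∈ pvKws) → (∀ a ∈ acc, a ∈ pvKws) →
    PySem.Set.update (acc.flatMap pvPay) (ks.flatMap pvPay) = (PySem.Set.update acc ks).flatMap pvPay := by
  induction ks with
  | nil => intro acc _ _; simp [PySem.Set.update]
  | cons k t ih =>
    intro acc hks hacc
    have hk : k ∈ pvKws := hks k (by simp)
    rw [List.flatMap_cons, PySem.Set.update_append, PySem.Set.update_cons]
    by_cases hmem : k ∈ acc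
    · have h1 : PySem.Set.update (acc.flatMap pvPay) (pvPay k) = acc.flatMap pvPay := by
        rw [PySem.Set.update_eq_append_filter]
        have hnil : List.filter (fun y => !PySem.Set.contains (acc.flatMap pvPay) y)
            (PySem.Set.ofList (pvPay k)) = [] := by
          apply List.filter_eq_nil_iff.2
          intro y hy
          have hy' : y ∈ pvPay k := (PySem.Set.mem_ofList _ _).1 hy
          have hin : y ∈ acc.flatMap pvPay := List.mem_flatMap.2 ⟨k, hmem, hy'⟩
          simpa using hin
        rw [hnil, List.append_nil]
      rw [h1, PySem.Set.add_of_mem hmem]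
      exact ih acc (fun x hx => hks x (by simp [hx])) hacc
    · have hdisj : ∀ y ∈ pvPay k, y ∉ acc.flatMap pvPay := by
        intro y hy hmem'
        obtain ⟨a, ha, hya⟩ := List.mem_flatMap.1 hmem'
        have hane : k ≠ a := fun h => hmem (h ▸ ha)
        exact pv_pay_disjoint k hk a (hacc a ha) hane y hy hya
      rw [PySem.Set.update_eq_append_of_disjoint _ _ (pv_pay_nodup k hk) hdisj,
          PySem.Set.add_of_not_mem hmem]
      have happ : acc.flatMap pvPay ++ pvPay k = (acc ++ [k]).flatMap pvPay := by simp
      rw [happ]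
      exact ih (acc ++ [k]) (fun x hx => hks x (by simp [hx]))
        (fun a ha => by rcases List.mem_append.1 ha with h | h
                        · exact hacc a h
                        · simp at h; exact h ▸ hk)

def pvMatch (e : String) : List String := pvKws.filter (fun kw => PySem.Str.isIn kw e)

-- one entity's contribution in A equals the payload expansion of its matched keywords
theorem pv_step (acc : List String) (e : String) :
    (let c := if PySem.Str.isIn "User" e then acc ++ ["authentication", "authorization"] else acc
     let c := if PySem.Str.isIn "Product" e then c ++ ["catalog_management", "search"] else c
     let c := if PySem.Str.isIn "Order" e then c ++ ["order_processing", "fulfillment"] else c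
     c) = acc ++ (pvMatch e).flatMap pvPay := by
  simp only [pvMatch, pvKws]
  cases h1 : PySem.Str.isIn "User" e <;> cases h2 : PySem.Str.isIn "Product" e <;>
    cases h3 : PySem.Str.isIn "Order" e <;>
      simp at h1 h2 h3 <;>
        simp [List.filter, h1, h2, h3, pv_payU, pv_payP, pv_payO]

theorem pv_A_flat (entities : List String) :
    identify_capabilities_py entities = PySem.Set.ofList (entities.flatMap (fun e => (pvMatch e).flatMap pvPay)) := by
  have h : ∀ acc : List String, entities.foldl (fun capabilities entity =>
      let capabilities := if PySem.Str.isIn "User" entity then capabilities ++ ["authentication", "authorization"] else capabilities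
      let capabilities := if PySem.Str.isIn "Product" entity then capabilities ++ ["catalog_management", "search"] else capabilities
      let capabilities := if PySem.Str.isIn "Order" entity then capabilities ++ ["order_processing", "fulfillment"] else capabilities
      capabilities) acc = acc ++ entities.flatMap (fun e => (pvMatch e).flatMap pvPay) := by
    induction entities with
    | nil => intro acc; simp
    | cons e t ih => intro acc; rw [List.foldl_cons, pv_step acc e, ih, List.flatMap_cons, List.append_assoc]
  simp only [identify_capabilities_py]
  exact congrArg PySem.Set.ofList (by simpa using h [])

-- ===== VERDICT (by name: the statement is the Claim_ definition above) =====
theorem identify_capabilities_py_spec : Claim_equal_identify_capabilities_py := by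
  intro entities _
  unfold Spec_identify_capabilities_py
  rw [pv_A_flat]
  have hflat : entities.flatMap (fun e => (pvMatch e).flatMap pvPay)
      = (entities.flatMap pvMatch).flatMap pvPay := by
    rw [List.flatMap_assoc]
  have hmemk : ∀ k ∈ entities.flatMap pvMatch, k ∈ pvKws := by
    intro k hk
    obtain ⟨e, _, hke⟩ := List.mem_flatMap.1 hk
    exact (List.mem_filter.1 hke).1
  have hco : PySem.Set.ofList ((entities.flatMap pvMatch).flatMap pvPay)
      = (PySem.Set.ofList (entities.flatMap pvMatch)).flatMap pvPay := by
    have h := pv_block (entities.flatMap pvMatch) [] hmemk (by simp)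
    simpa [PySem.Set.update_nil_left] using h
  rw [hflat, hco]
  simp only [identify_capabilities_py_alt, pv_keys_caps, PySem.List.dedup_eq_ofList]
  rfl
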